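-- pv_equiv track=rewrite | github.com/kevinamiri/maila | file.py | is_file_included
-- ===== SOURCE A (Python) =====
-- EXCLUDE_DIRS = [
--     'venv', 'node_modules', '.git', 'build', 'dist', '.github',
--     'target', 'out', 'bin', 'lib', '.idea', '.vscode', '.settings',
--     'agent.log', 'exchange_log.json', '.next', 'public',
--     'p.md', 'src', 'generated-projects',
--     'src', 'plugins', 'amplify', '.cache', 'static'
-- ]
--
-- INCLUDE_DIRS = [
--     'src/theme'  # Specific directory inclusion
-- ]
--
-- INCLUDE_FILE_EXTENSIONS = ['php', 'yml', 'yaml', 'ts', 'json']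
--
-- EXCLUDE_FILE_EXTENSIONS = ['log', 'md', 'txt']
--
-- EXCLUDE_FILES = [
--     'package-lock.json', 'yarn.lock', 'conversation.json', 'exchange_log.json',
--     'readme.md', 'exchange_log.md', 'p.md', '.env', 'bash.bash', '.eslintrc.json', '.cursorrules', 'prompt.md', 'objectives.md', 'debug.log', ' next.d.ts', 'tsconfig.json', 'package.json', 'next.config.js', 'next-env.d.ts',
--     'src/theme/oldtheme.js', 'src/theme/shadows.js'
-- ]
--
-- INCLUDE_FILES = ['debug.log']  # Example include file
--
-- def is_file_included(file: str) -> bool: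
--     """Determine if a file should be included based on inclusion and exclusion rules with weighted precedence."""
--     rule_weights = {
--         'include_file': 100,
--         'exclude_file': 90,
--         'include_dir': 80,
--         'exclude_dir': 70,
--         'include_ext': 60,
--         'exclude_ext': 50
--     }
--
--     applied_rules = []
--
--     # Check INCLUDE_FILES
--     for inc_file in INCLUDE_FILES:
--         if file == inc_file:
--             applied_rules.append(('include_file', rule_weights['include_file']))
--
--     # Check EXCLUDE_FILES
--     for exc_file in EXCLUDE_FILES:
--         if file == exc_file:
--             applied_rules.append(('exclude_file', rule_weights['exclude_file']))
--
--     # Check INCLUDE_DIRS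
--     for inc_dir in INCLUDE_DIRS:
--         if file.startswith(f'{inc_dir}/'):
--             applied_rules.append(('include_dir', rule_weights['include_dir']))
--
--     # Check EXCLUDE_DIRS
--     for exc_dir in EXCLUDE_DIRS:
--         if file.startswith(f'{exc_dir}/'):
--             applied_rules.append(('exclude_dir', rule_weights['exclude_dir']))
--
--     # Check file extensions
--     if '.' in file:
--         ext = file.split('.')[-1]
--         # Check INCLUDE_FILE_EXTENSIONS
--         if ext in INCLUDE_FILE_EXTENSIONS:
--             applied_rules.append(('include_ext', rule_weights['include_ext']))
--         # Check EXCLUDE_FILE_EXTENSIONS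
--         if ext in EXCLUDE_FILE_EXTENSIONS:
--             applied_rules.append(('exclude_ext', rule_weights['exclude_ext']))
--
--     if not applied_rules:
--         # Default action if no rules match
--         return False
--
--     # Determine the rule with the highest weight
--     applied_rules.sort(key=lambda x: x[1], reverse=True)
--     highest_weight = applied_rules[0][1]
--     # Get all rules with the highest weight
--     highest_rules = [rule for rule in applied_rules if rule[1] == highest_weight]
--
--     # If multiple rules have the same highest weight, prioritize 'include' over 'exclude'
--     for rule in highest_rules:
--         if rule[0].startswith('include'):
--             return True
--     return False
-- ===== SOURCE B (Python) =====
-- EXCLUDE_DIRS = [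
--     'venv', 'node_modules', '.git', 'build', 'dist', '.github',
--     'target', 'out', 'bin', 'lib', '.idea', '.vscode', '.settings',
--     'agent.log', 'exchange_log.json', '.next', 'public',
--     'p.md', 'src', 'generated-projects',
--     'src', 'plugins', 'amplify', '.cache', 'static'
-- ]
--
-- INCLUDE_DIRS = ['src/theme']
--
-- INCLUDE_FILE_EXTENSIONS = ['php', 'yml', 'yaml', 'ts', 'json']
--
-- EXCLUDE_FILE_EXTENSIONS = ['log', 'md', 'txt']
--
-- EXCLUDE_FILES = [
--     'package-lock.json', 'yarn.lock', 'conversation.json', 'exchange_log.json',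
--     'readme.md', 'exchange_log.md', 'p.md', '.env', 'bash.bash', '.eslintrc.json', '.cursorrules', 'prompt.md', 'objectives.md', 'debug.log', ' next.d.ts', 'tsconfig.json', 'package.json', 'next.config.js', 'next-env.d.ts',
--     'src/theme/oldtheme.js', 'src/theme/shadows.js'
-- ]
--
-- INCLUDE_FILES = ['debug.log']
--
-- # Priority-ordered rule table: since all six rule weights in A are distinct,
-- # the decision is simply the verdict of the first matching rule.
-- RULES = [
--     (lambda f: f in INCLUDE_FILES, True),
--     (lambda f: f in EXCLUDE_FILES, False),
--     (lambda f: any(f.startswith(d + '/') for d in INCLUDE_DIRS), True),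
--     (lambda f: any(f.startswith(d + '/') for d in EXCLUDE_DIRS), False),
--     (lambda f: '.' in f and f.split('.')[-1] in INCLUDE_FILE_EXTENSIONS, True),
--     (lambda f: '.' in f and f.split('.')[-1] in EXCLUDE_FILE_EXTENSIONS, False),
-- ]
--
--
-- def is_file_included(file: str) -> bool:
--     """First matching rule in the priority-ordered table decides; default False."""
--     return next((verdict for pred, verdict in RULES if pred(file)), False)
-- ===== Notes on version B (the rewrite author's own statement) =====
-- stated objective: simpler
-- what changed: B replaces A's collect-all-matching-rules / sort-by-weight / filter-to-max / scan-for-include pipeline with a priority-ordered (predicate, verdict) rule table searched for its first match (valid because A's six weights are all distinct, so the max-weight rule is just the first matching category).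
import Mathlib
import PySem

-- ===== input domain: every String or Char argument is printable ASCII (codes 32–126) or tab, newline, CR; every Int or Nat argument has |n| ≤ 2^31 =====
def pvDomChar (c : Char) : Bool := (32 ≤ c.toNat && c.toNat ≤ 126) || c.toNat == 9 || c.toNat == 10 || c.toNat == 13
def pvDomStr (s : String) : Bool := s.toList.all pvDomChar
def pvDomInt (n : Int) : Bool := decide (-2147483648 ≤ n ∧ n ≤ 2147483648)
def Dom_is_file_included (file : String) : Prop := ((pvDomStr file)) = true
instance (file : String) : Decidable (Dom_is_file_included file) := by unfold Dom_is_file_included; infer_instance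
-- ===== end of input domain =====

-- B replaces A's collect-all-rules / sort-by-weight / max-filter machinery by a priority-ordered
-- (predicate, verdict) rule table searched for its first match (sound since A's weights are distinct);
-- objective: simpler.

-- ===== PORT A =====
-- module-level constants
def pvExcludeDirs : List String := ["venv", "node_modules", ".git", "build", "dist", ".github",
  "target", "out", "bin", "lib", ".idea", ".vscode", ".settings",
  "agent.log", "exchange_log.json", ".next", "public",
  "p.md", "src", "generated-projects",
  "src", "plugins", "amplify", ".cache", "static"]
def pvIncludeDirs : List String := ["src/theme"]
def pvIncludeExts : List String := ["php", "yml", "yaml", "ts", "json"]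
def pvExcludeExts : List String := ["log", "md", "txt"]
def pvExcludeFiles : List String := ["package-lock.json", "yarn.lock", "conversation.json", "exchange_log.json",
  "readme.md", "exchange_log.md", "p.md", ".env", "bash.bash", ".eslintrc.json", ".cursorrules", "prompt.md",
  "objectives.md", "debug.log", " next.d.ts", "tsconfig.json", "package.json", "next.config.js", "next-env.d.ts",
  "src/theme/oldtheme.js", "src/theme/shadows.js"]
def pvIncludeFiles : List String := ["debug.log"]

-- A's rule_weights dict
def pvRuleWeights : PySem.Dict String Int :=
  PySem.Dict.ofList [("include_file", 100), ("exclude_file", 90), ("include_dir", 80),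
                     ("exclude_dir", 70), ("include_ext", 60), ("exclude_ext", 50)]

-- ext = file.split('.')[-1]: the text after the last '.' (both A and B compute this)
def pvExt (file : String) : String :=
  PySem.List.pyGetD ((PySem.Str.split? file ".").getD []) (-1) ""

-- A's final section: sort by weight (reverse), take the highest weight, keep the rules with that
-- weight, return True iff one of them is an 'include*' rule ('for rule in …: if …: return True; return False')
def pvDecideRules (applied : List (String × Int)) : Bool :=
  if applied = [] then false
  else
    let sortedRules := PySem.List.sorted applied (fun x => x.2) true
    let highestWeight := (PySem.List.pyGetD sortedRules 0 ("", 0)).2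
    let highestRules := sortedRules.filter (fun r => r.2 == highestWeight)
    highestRules.any (fun r => PySem.Str.startswith r.1 "include")

def is_file_included (file : String) : Bool :=
  let applied : List (String × Int) := []
  let applied := pvIncludeFiles.foldl (fun acc f =>
    if file == f then acc ++ [("include_file", PySem.Dict.getD pvRuleWeights "include_file" 0)] else acc) applied
  let applied := pvExcludeFiles.foldl (fun acc f =>
    if file == f then acc ++ [("exclude_file", PySem.Dict.getD pvRuleWeights "exclude_file" 0)] else acc) applied
  let applied := pvIncludeDirs.foldl (fun acc d =>
    if PySem.Str.startswith file (d ++ "/") then acc ++ [("include_dir", PySem.Dict.getD pvRuleWeights "include_dir" 0)] else acc) applied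
  let applied := pvExcludeDirs.foldl (fun acc d =>
    if PySem.Str.startswith file (d ++ "/") then acc ++ [("exclude_dir", PySem.Dict.getD pvRuleWeights "exclude_dir" 0)] else acc) applied
  let applied :=
    if PySem.Str.isIn "." file then
      let ext := pvExt file
      let applied := if pvIncludeExts.contains ext then
        applied ++ [("include_ext", PySem.Dict.getD pvRuleWeights "include_ext" 0)] else applied
      let applied := if pvExcludeExts.contains ext then
        applied ++ [("exclude_ext", PySem.Dict.getD pvRuleWeights "exclude_ext" 0)] else applied
      applied
    else applied
  pvDecideRules applied

-- ===== PORT B =====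
-- Source B's RULES: a priority-ordered table of (predicate, verdict) pairs
def pvRules : List ((String → Bool) × Bool) :=
  [ (fun f => pvIncludeFiles.contains f, true),
    (fun f => pvExcludeFiles.contains f, false),
    (fun f => pvIncludeDirs.any (fun d => PySem.Str.startswith f (d ++ "/")), true),
    (fun f => pvExcludeDirs.any (fun d => PySem.Str.startswith f (d ++ "/")), false),
    (fun f => PySem.Str.isIn "." f && pvIncludeExts.contains (pvExt f), true),
    (fun f => PySem.Str.isIn "." f && pvExcludeExts.contains (pvExt f), false) ]

-- next((verdict for pred, verdict in RULES if pred(file)), False)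
def is_file_included_alt (file : String) : Bool :=
  ((pvRules.find? (fun rule => rule.1 file)).map (fun rule => rule.2)).getD false

-- ===== PRECONDITION & SPEC =====
def Spec_is_file_included (file : String) (out : Bool) : Prop := out = is_file_included_alt file
instance (file : String) (out : Bool) : Decidable (Spec_is_file_included file out) := by unfold Spec_is_file_included; infer_instance

-- ===== CLAIM (what is proved, stated in full; the proofs are below) =====
def Claim_equal_is_file_included : Prop := ∀ (file : String), Dom_is_file_included file → Spec_is_file_included file (is_file_included file)

-- ===== LEMMAS AND PROOFS =====

-- the six rule constants, and the shape of A's applied_rules list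
def pvC1 : String × Int := ("include_file", 100)
def pvC2 : String × Int := ("exclude_file", 90)
def pvC3 : String × Int := ("include_dir", 80)
def pvC4 : String × Int := ("exclude_dir", 70)
def pvC5 : String × Int := ("include_ext", 60)
def pvC6 : String × Int := ("exclude_ext", 50)

def pvR (k1 k2 k3 k4 k5 k6 : Nat) : List (String × Int) :=
  List.replicate k1 pvC1 ++ List.replicate k2 pvC2 ++ List.replicate k3 pvC3 ++
  List.replicate k4 pvC4 ++ List.replicate k5 pvC5 ++ List.replicate k6 pvC6

lemma pv_pairwise_R (k1 k2 k3 k4 k5 k6 : Nat) :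
    (pvR k1 k2 k3 k4 k5 k6).Pairwise (fun a b : String × Int => b.2 ≤ a.2) := by
  unfold pvR
  simp [List.pairwise_append, List.pairwise_replicate, List.mem_replicate, pvC1, pvC2, pvC3, pvC4, pvC5, pvC6]
  aesop

lemma pv_sorted_R (k1 k2 k3 k4 k5 k6 : Nat) :
    PySem.List.sorted (pvR k1 k2 k3 k4 k5 k6) (fun x => x.2) true = pvR k1 k2 k3 k4 k5 k6 := by
  apply PySem.List.sorted_rev_eq_self_of_pairwise
  exact pv_pairwise_R k1 k2 k3 k4 k5 k6

lemma pv_tail_R (k1 k2 k3 k4 k5 k6 : Nat) :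
    pvDecideRules (pvR k1 k2 k3 k4 k5 k6) =
      (if k1 ≠ 0 then true else if k2 ≠ 0 then false else if k3 ≠ 0 then true
       else if k4 ≠ 0 then false else if k5 ≠ 0 then true else false) := by
  have h1 : PySem.Chars.startswith ['i', 'n', 'c', 'l', 'u', 'd', 'e', '_', 'f', 'i', 'l', 'e'] ['i', 'n', 'c', 'l', 'u', 'd', 'e'] = true := by decide
  have h2 : PySem.Chars.startswith ['e', 'x', 'c', 'l', 'u', 'd', 'e', '_', 'f', 'i', 'l', 'e'] ['i', 'n', 'c', 'l', 'u', 'd', 'e'] = false := by decide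
  have h3 : PySem.Chars.startswith ['i', 'n', 'c', 'l', 'u', 'd', 'e', '_', 'd', 'i', 'r'] ['i', 'n', 'c', 'l', 'u', 'd', 'e'] = true := by decide
  have h4 : PySem.Chars.startswith ['e', 'x', 'c', 'l', 'u', 'd', 'e', '_', 'd', 'i', 'r'] ['i', 'n', 'c', 'l', 'u', 'd', 'e'] = false := by decide
  have h5 : PySem.Chars.startswith ['i', 'n', 'c', 'l', 'u', 'd', 'e', '_', 'e', 'x', 't'] ['i', 'n', 'c', 'l', 'u', 'd', 'e'] = true := by decide
  have h6 : PySem.Chars.startswith ['e', 'x', 'c', 'l', 'u', 'd', 'e', '_', 'e', 'x', 't'] ['i', 'n', 'c', 'l', 'u', 'd', 'e'] = false := by decide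
  unfold pvDecideRules
  rw [pv_sorted_R]
  cases k1 <;> cases k2 <;> cases k3 <;> cases k4 <;> cases k5 <;> cases k6 <;>
    simp [pvR, List.replicate_succ, List.filter_append,
      List.any_cons, pvC1, pvC2, pvC3, pvC4, pvC5, pvC6,
      h1, h2, h3, h4, h5, h6, PySem.List.pyGetD_zero_cons]

lemma pv_weights_getD :
    PySem.Dict.getD pvRuleWeights "include_file" 0 = 100 ∧
    PySem.Dict.getD pvRuleWeights "exclude_file" 0 = 90 ∧
    PySem.Dict.getD pvRuleWeights "include_dir" 0 = 80 ∧
    PySem.Dict.getD pvRuleWeights "exclude_dir" 0 = 70 ∧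
    PySem.Dict.getD pvRuleWeights "include_ext" 0 = 60 ∧
    PySem.Dict.getD pvRuleWeights "exclude_ext" 0 = 50 := by decide

lemma pv_A_eq (file : String) :
    is_file_included file =
      pvDecideRules (pvR
        (pvIncludeFiles.filter (fun f => file == f)).length
        (pvExcludeFiles.filter (fun f => file == f)).length
        (pvIncludeDirs.filter (fun d => PySem.Str.startswith file (d ++ "/"))).length
        (pvExcludeDirs.filter (fun d => PySem.Str.startswith file (d ++ "/"))).length
        (if PySem.Str.isIn "." file && pvIncludeExts.contains (pvExt file) then 1 else 0)
        (if PySem.Str.isIn "." file && pvExcludeExts.contains (pvExt file) then 1 else 0)) := by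
  obtain ⟨w1, w2, w3, w4, w5, w6⟩ := pv_weights_getD
  unfold is_file_included pvR
  simp only [PySem.List.foldl_append_if, w1, w2, w3, w4, w5, w6]
  by_cases hdot : PySem.Str.isIn "." file <;>
    by_cases hinc : pvIncludeExts.contains (pvExt file) <;>
      by_cases hexc : pvExcludeExts.contains (pvExt file) <;>
        simp_all [List.map_const', pvC1, pvC2, pvC3, pvC4, pvC5, pvC6, List.append_assoc]

-- ===== VERDICT (by name: the statement is the Claim_ definition above) =====
theorem is_file_included_spec : Claim_equal_is_file_included := by
  intro file _
  unfold Spec_is_file_included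
  rw [pv_A_eq, pv_tail_R]
  by_cases h1 : pvIncludeFiles.contains file <;>
  by_cases h2 : pvExcludeFiles.contains file <;>
  by_cases h3 : pvIncludeDirs.any (fun d => PySem.Str.startswith file (d ++ "/")) <;>
  by_cases h4 : pvExcludeDirs.any (fun d => PySem.Str.startswith file (d ++ "/")) <;>
  by_cases hdot : PySem.Str.isIn "." file <;>
  by_cases hinc : pvIncludeExts.contains (pvExt file) <;>
  by_cases hexc : pvExcludeExts.contains (pvExt file) <;>
    simp_all [is_file_included_alt, pvRules]
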